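-- pv_equiv track=rewrite | github.com/YurouTang/CS3245-Legal-Case-Retrieval-Project | search_legal.py | has_phrase_2
-- ===== SOURCE A (Python) =====
-- def has_phrase_2(list_1, list_2):
--     # perform 'merge'
--     l_index = 0  # current index in left_operand
--     r_index = 0  # current index in right_operand
--
--     while (l_index < len(list_1) and r_index < len(list_2)):
--         l_item = list_1[l_index]  # current item in left_operand
--         r_item = list_2[r_index]  # current item in right_operand
--
--         # case 1: if match
--         if (int(l_item) == int(r_item) - 1):
--             return True
--
--         # case 2: if left item is more than right item
--         elif (int(l_item) > int(r_item)):
--                 r_index += 1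
--
--         # case 3: if left item is less than right item
--         else:
--                 l_index += 1
--     return False
-- ===== SOURCE B (Python) =====
-- def _first_ge(vals, bmax, b, p, x):
--     # first index j >= p with vals[j] >= x, using precomputed block maxima; len(vals) if none
--     m = len(vals)
--     k0 = p // b
--     for j in range(p, min((k0 + 1) * b, m)):
--         if vals[j] >= x:
--             return j
--     for k in range(k0 + 1, len(bmax)):
--         if bmax[k] >= x:
--             for j in range(k * b, min((k + 1) * b, m)):
--                 if vals[j] >= x:
--                     return j
--     return m
--
--
-- def has_phrase_2(list_1, list_2):
--     # Sqrt-decomposition: precompute block maxima of list_2, then walk list_1 once,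
--     # jumping the right cursor over whole blocks whose maximum is below the current item.
--     vals = [int(v) for v in list_2]
--     m = len(vals)
--     b = 1
--     while b * b < m:
--         b += 1
--     bmax = [max(vals[k * b:(k + 1) * b]) for k in range((m + b - 1) // b)]
--     r = 0
--     for v in list_1:
--         x = int(v)
--         j = _first_ge(vals, bmax, b, r, x)
--         if j == m:
--             return False
--         if vals[j] == x + 1:
--             return True
--         r = j
--     return False
-- ===== Notes on version B (the rewrite author's own statement) =====
-- stated objective: alternative
-- what changed: Replaces A's two-pointer three-way merge with a sqrt-decomposition: block maxima of list_2 are precomputed once, and a single walk over list_1 advances the right cursor by jumping over whole blocks whose maximum is below the current element.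
import Mathlib
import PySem

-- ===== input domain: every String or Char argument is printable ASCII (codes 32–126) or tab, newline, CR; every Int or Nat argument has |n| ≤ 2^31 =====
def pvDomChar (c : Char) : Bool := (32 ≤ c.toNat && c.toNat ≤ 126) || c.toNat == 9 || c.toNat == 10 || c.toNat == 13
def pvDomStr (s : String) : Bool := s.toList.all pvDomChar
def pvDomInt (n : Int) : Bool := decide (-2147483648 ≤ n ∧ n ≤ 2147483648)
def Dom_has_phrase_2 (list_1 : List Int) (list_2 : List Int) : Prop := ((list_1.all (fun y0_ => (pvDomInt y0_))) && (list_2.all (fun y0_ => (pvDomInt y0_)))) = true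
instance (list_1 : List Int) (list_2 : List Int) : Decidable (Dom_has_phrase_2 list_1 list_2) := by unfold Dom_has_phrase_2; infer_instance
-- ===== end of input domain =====

-- B replaces A's two-pointer three-way merge with a sqrt-decomposition over list_2: precomputed
-- block maxima let a single walk over list_1 jump the right cursor over whole blocks; proved to
-- return exactly A's value on every input.


-- ===== PORT A =====
-- A's while-loop over the two indices l_index / r_index, three-way branch each step.
def hasPhraseGo (list_1 list_2 : List Int) (l r : Nat) : Bool :=
  if h : l < list_1.length ∧ r < list_2.length then
    let l_item := list_1[l]'h.1
    let r_item := list_2[r]'h.2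
    if l_item = r_item - 1 then true
    else if l_item > r_item then hasPhraseGo list_1 list_2 l (r + 1)
    else hasPhraseGo list_1 list_2 (l + 1) r
  else false
termination_by (list_1.length - l) + (list_2.length - r)
decreasing_by all_goals omega

def has_phrase_2 (list_1 : List Int) (list_2 : List Int) : Bool :=
  hasPhraseGo list_1 list_2 0 0

-- ===== PORT B =====
-- Source B's 'b = 1; while b * b < m: b += 1'.
def calcB (m b : Nat) : Nat :=
  if h : b * b < m then calcB m (b + 1) else b
termination_by m - b * b
decreasing_by
  have h1 : b * b + 1 ≤ (b + 1) * (b + 1) := by nlinarith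
  omega

-- Source B's comprehension 'bmax = [max(vals[k*b:(k+1)*b]) for k in range((m+b-1)//b)]';
-- every slice is nonempty there, so Python's max() never raises and equals max?.getD 0.
def bmaxOf (vals : List Int) (b : Nat) : List Int :=
  (List.range ((vals.length + b - 1) / b)).map
    (fun k => ((vals.drop (k * b)).take b).max?.getD 0)

-- Source B's 'for j in range(j0, e): if vals[j] >= x: return j' (indices are in bounds, so
-- Python's vals[j] is getD).
def scanFrom (vals : List Int) (x : Int) (j e : Nat) : Option Nat :=
  if h : j < e then
    if x ≤ vals.getD j 0 then some j else scanFrom vals x (j + 1) e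
  else none
termination_by e - j

-- Source B's 'for k in range(k0+1, len(bmax)): if bmax[k] >= x: <scan that block>'.
def blockScan (vals bmax : List Int) (b : Nat) (x : Int) (k : Nat) : Option Nat :=
  if h : k < bmax.length then
    if x ≤ bmax.getD k 0 then
      match scanFrom vals x (k * b) (min ((k + 1) * b) vals.length) with
      | some j => some j
      | none => blockScan vals bmax b x (k + 1)
    else blockScan vals bmax b x (k + 1)
  else none
termination_by bmax.length - k

-- Source B's _first_ge: partial block from p, then whole blocks via bmax; m if none.
def firstGe (vals bmax : List Int) (b p : Nat) (x : Int) : Nat :=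
  match scanFrom vals x p (min ((p / b + 1) * b) vals.length) with
  | some j => j
  | none =>
    match blockScan vals bmax b x (p / b + 1) with
    | some j => j
    | none => vals.length

-- Source B's main 'for v in list_1' loop carrying the cursor r.
def altGo (vals bmax : List Int) (b : Nat) : List Int → Nat → Bool
  | [], _ => false
  | x :: rest, r =>
    let j := firstGe vals bmax b r x
    if j = vals.length then false
    else if vals.getD j 0 = x + 1 then true
    else altGo vals bmax b rest j

def has_phrase_2_alt (list_1 : List Int) (list_2 : List Int) : Bool :=
  let vals := list_2
  let b := calcB vals.length 1
  altGo vals (bmaxOf vals b) b list_1 0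

-- ===== PRECONDITION & SPEC =====
def Spec_has_phrase_2 (list_1 : List Int) (list_2 : List Int) (out : Bool) : Prop := out = has_phrase_2_alt list_1 list_2
instance (list_1 : List Int) (list_2 : List Int) (out : Bool) : Decidable (Spec_has_phrase_2 list_1 list_2 out) := by unfold Spec_has_phrase_2; infer_instance

-- ===== CLAIM (what is proved, stated in full; the proofs are below) =====
def Claim_equal_has_phrase_2 : Prop := ∀ (list_1 : List Int) (list_2 : List Int), Dom_has_phrase_2 list_1 list_2 → Spec_has_phrase_2 list_1 list_2 (has_phrase_2 list_1 list_2)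

-- ===== LEMMAS AND PROOFS =====

-- Proof-side reference form of the cursor: linear scan for the first index ≥ r holding
-- a value ≥ x (returns r itself once past the end).
def skipR (list_2 : List Int) (x : Int) (r : Nat) : Nat :=
  if h : r < list_2.length then
    if list_2[r]'h < x then skipR list_2 x (r + 1) else r
  else r
termination_by list_2.length - r

-- Proof-side reference form of B's outer loop, with the cursor moved by skipR.
def altLoop (list_2 : List Int) (r : Nat) : List Int → Bool
  | [] => false
  | x :: rest =>
    let r' := skipR list_2 x r
    if h : r' < list_2.length then
      if list_2[r']'h = x + 1 then true else altLoop list_2 r' rest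
    else false

-- One outer step of A's merge equals: skip the cursor, then test, then continue with l+1.
theorem go_step (list_1 list_2 : List Int) (l r : Nat) (hl : l < list_1.length) :
    hasPhraseGo list_1 list_2 l r =
      (if h : skipR list_2 (list_1[l]'hl) r < list_2.length then
        if list_2[skipR list_2 (list_1[l]'hl) r]'h = (list_1[l]'hl) + 1 then true
        else hasPhraseGo list_1 list_2 (l + 1) (skipR list_2 (list_1[l]'hl) r)
      else false) := by
  induction hn : list_2.length - r using Nat.strong_induction_on generalizing r with
  | _ n ih =>
  by_cases hr : r < list_2.length
  · rw [hasPhraseGo]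
    simp only [hl, hr, and_self, dif_pos]
    by_cases hm : list_1[l]'hl = (list_2[r]'hr) - 1
    · have hskip : skipR list_2 (list_1[l]'hl) r = r := by
        rw [skipR]; simp only [hr, dif_pos]
        have : ¬ (list_2[r]'hr < list_1[l]'hl) := by omega
        simp [this]
      have hv : list_2[r]'hr = (list_1[l]'hl) + 1 := by omega
      rw [if_pos hm, hskip]
      simp [hr, hv]
    · by_cases hgt : list_1[l]'hl > list_2[r]'hr
      · have hskip : skipR list_2 (list_1[l]'hl) r = skipR list_2 (list_1[l]'hl) (r + 1) := by
          rw [skipR]; simp [hr, hgt]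
        simp only [hm, hgt, hskip]
        exact ih (list_2.length - (r + 1)) (by omega) (r + 1) rfl
      · have hskip : skipR list_2 (list_1[l]'hl) r = r := by
          rw [skipR]; simp only [hr, dif_pos]
          have : ¬ (list_2[r]'hr < list_1[l]'hl) := by omega
          simp [this]
        simp only [hm, if_neg, hgt, if_neg, not_false_iff, hskip]
        have hne : ¬ (list_2[r]'hr = (list_1[l]'hl) + 1) := by omega
        simp [hr, hne]
  · have hskip : skipR list_2 (list_1[l]'hl) r = r := by rw [skipR]; simp [hr]
    rw [hasPhraseGo]
    simp [hr, hskip]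

-- A's merge from state (l, r) equals the reference loop over the remaining suffix of list_1.
theorem go_eq_altLoop (list_1 list_2 : List Int) (l r : Nat) :
    hasPhraseGo list_1 list_2 l r = altLoop list_2 r (list_1.drop l) := by
  induction hn : list_1.length - l using Nat.strong_induction_on generalizing l r with
  | _ n ih =>
  by_cases hl : l < list_1.length
  · have hdrop : list_1.drop l = (list_1[l]'hl) :: list_1.drop (l + 1) :=
      List.drop_eq_getElem_cons hl
    rw [go_step list_1 list_2 l r hl, hdrop, altLoop]
    by_cases h : skipR list_2 (list_1[l]'hl) r < list_2.length
    · simp only [h, dif_pos]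
      by_cases he : list_2[skipR list_2 (list_1[l]'hl) r]'h = (list_1[l]'hl) + 1
      · simp [he]
      · simp only [he, if_neg, not_false_iff]
        exact ih (list_1.length - (l + 1)) (by omega) (l + 1) _ rfl
    · simp [h]
  · have : list_1.drop l = [] := List.drop_eq_nil_of_le (by omega)
    rw [hasPhraseGo, this, altLoop]
    simp [hl]

-- skipR is determined by its specification: first index q ≥ r with x ≤ list_2[q], else length.
theorem skipR_eq (list_2 : List Int) (x : Int) :
    ∀ r q : Nat, r ≤ q → q ≤ list_2.length →
    (∀ j, ∀ hj : j < list_2.length, r ≤ j → j < q → list_2[j]'hj < x) →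
    (∀ hq : q < list_2.length, x ≤ list_2[q]'hq) →
    skipR list_2 x r = q := by
  intro r q
  induction hn : q - r using Nat.strong_induction_on generalizing r with
  | _ n ih =>
  intro hrq hq hlt hstop
  by_cases hr : r < list_2.length
  · rw [skipR, dif_pos hr]
    by_cases hc : list_2[r]'hr < x
    · have hrq' : r < q := by
        rcases Nat.lt_or_ge r q with h | h
        · exact h
        · have : r = q := by omega
          subst this
          have := hstop hr
          omega
      rw [if_pos hc]
      exact ih (q - (r + 1)) (by omega) (r + 1) rfl (by omega) hq
        (fun j hj h1 h2 => hlt j hj (by omega) h2) hstop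
    · rw [if_neg hc]
      rcases Nat.lt_or_ge r q with h | h
      · exact absurd (hlt r hr (le_refl r) h) hc
      · omega
  · rw [skipR, dif_neg hr]
    omega

theorem skipR_le (list_2 : List Int) (x : Int) :
    ∀ r, r ≤ list_2.length → skipR list_2 x r ≤ list_2.length := by
  intro r
  induction hn : list_2.length - r using Nat.strong_induction_on generalizing r with
  | _ n ih =>
  intro hr
  rw [skipR]
  by_cases h : r < list_2.length
  · rw [dif_pos h]
    by_cases hc : list_2[r]'h < x
    · rw [if_pos hc]
      exact ih (list_2.length - (r + 1)) (by omega) (r + 1) rfl (by omega)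
    · rw [if_neg hc]; omega
  · rw [dif_neg h]; omega

-- scanFrom: the found index is the first one ≥ the start with a value ≥ x.
theorem scanFrom_some (vals : List Int) (x : Int) :
    ∀ j e q : Nat, scanFrom vals x j e = some q →
      j ≤ q ∧ q < e ∧ x ≤ vals.getD q 0 ∧ ∀ i, j ≤ i → i < q → vals.getD i 0 < x := by
  intro j e
  induction hn : e - j using Nat.strong_induction_on generalizing j with
  | _ n ih =>
  intro q hs
  rw [scanFrom] at hs
  by_cases hj : j < e
  · rw [dif_pos hj] at hs
    by_cases hx : x ≤ vals.getD j 0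
    · rw [if_pos hx] at hs
      cases hs
      exact ⟨le_refl _, hj, hx, fun i h1 h2 => by omega⟩
    · rw [if_neg hx] at hs
      obtain ⟨a1, a2, a3, a4⟩ := ih (e - (j + 1)) (by omega) (j + 1) rfl q hs
      refine ⟨by omega, a2, a3, ?_⟩
      intro i h1 h2
      rcases Nat.lt_or_ge i (j + 1) with h | h
      · have : i = j := by omega
        subst this
        omega
      · exact a4 i h h2
  · rw [dif_neg hj] at hs
    cases hs

theorem scanFrom_none (vals : List Int) (x : Int) :
    ∀ j e : Nat, scanFrom vals x j e = none →
      ∀ i, j ≤ i → i < e → vals.getD i 0 < x := by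
  intro j e
  induction hn : e - j using Nat.strong_induction_on generalizing j with
  | _ n ih =>
  intro hs i h1 h2
  rw [scanFrom] at hs
  by_cases hj : j < e
  · rw [dif_pos hj] at hs
    by_cases hx : x ≤ vals.getD j 0
    · rw [if_pos hx] at hs; cases hs
    · rw [if_neg hx] at hs
      rcases Nat.lt_or_ge i (j + 1) with h | h
      · have : i = j := by omega
        subst this
        omega
      · exact ih (e - (j + 1)) (by omega) (j + 1) rfl hs i h h2
  · omega

-- max() facts for the block maxima.
theorem le_foldl_max (t : List Int) : ∀ a : Int, a ≤ t.foldl max a := by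
  induction t with
  | nil => intro a; exact le_refl a
  | cons h t ih =>
    intro a
    exact le_trans (le_max_left a h) (ih (max a h))

theorem mem_le_foldl_max (t : List Int) : ∀ a x : Int, x ∈ t → x ≤ t.foldl max a := by
  induction t with
  | nil => intro a x hx; cases hx
  | cons h t ih =>
    intro a x hx
    rcases List.mem_cons.mp hx with rfl | hxt
    · exact le_trans (le_max_right a x) (le_foldl_max t (max a x))
    · exact ih (max a h) x hxt

theorem mem_le_maxD (l : List Int) (a : Int) (ha : a ∈ l) : a ≤ l.max?.getD 0 := by
  cases l with
  | nil => cases ha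
  | cons h t =>
    have hd : (h :: t).max?.getD 0 = t.foldl max h := by simp [List.max?]
    rw [hd]
    rcases List.mem_cons.mp ha with rfl | hat
    · exact le_foldl_max t a
    · exact mem_le_foldl_max t h a hat

-- Every element of block k is bounded by its precomputed maximum.
theorem block_le_bmax (vals : List Int) (b : Nat) (k i : Nat)
    (hk : k < (vals.length + b - 1) / b) (hi : i < vals.length)
    (h1 : k * b ≤ i) (h2 : i < (k + 1) * b) :
    vals[i]'hi ≤ (bmaxOf vals b).getD k 0 := by
  have hlen : (bmaxOf vals b).length = (vals.length + b - 1) / b := by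
    simp [bmaxOf]
  have hget : (bmaxOf vals b).getD k 0 = ((vals.drop (k * b)).take b).max?.getD 0 := by
    rw [List.getD_eq_getElem _ _ (by omega : k < (bmaxOf vals b).length)]
    simp [bmaxOf]
  rw [hget]
  apply mem_le_maxD
  have hdl : (vals.drop (k * b)).length = vals.length - k * b := List.length_drop
  have hidx : i - k * b < ((vals.drop (k * b)).take b).length := by
    simp only [List.length_take, hdl]
    have : (k + 1) * b = k * b + b := by ring
    omega
  have : ((vals.drop (k * b)).take b)[i - k * b]'hidx = vals[i]'hi := by
    rw [List.getElem_take, List.getElem_drop]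
    congr 1
    omega
  rw [← this]
  exact List.getElem_mem hidx

-- Ceiling-division bound: the blocks cover the whole of vals.
theorem blocks_cover (m b : Nat) (hb : 0 < b) : m ≤ ((m + b - 1) / b) * b := by
  rcases Nat.eq_zero_or_pos m with hm | hm
  · simp [hm]
  · have hrw : m + b - 1 = (m - 1) + b := by omega
    rw [hrw, Nat.add_div_right _ hb]
    have h1 := Nat.div_add_mod (m - 1) b
    have h2 := Nat.mod_lt (m - 1) hb
    have hg : ((m - 1) / b + 1) * b = b * ((m - 1) / b) + b := by ring
    rw [hg]
    generalize b * ((m - 1) / b) = P at h1 ⊢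
    omega

theorem lt_succ_div_mul (p b : Nat) (hb : 0 < b) : p < (p / b + 1) * b := by
  have h1 := Nat.div_add_mod p b
  have h2 := Nat.mod_lt p hb
  have hg : (p / b + 1) * b = b * (p / b) + b := by ring
  rw [hg]
  generalize b * (p / b) = P at h1 ⊢
  omega

-- The block-jumping stage computes exactly the remaining linear skip.
theorem blockScan_eq_skipR (vals : List Int) (b : Nat) (hb : 0 < b) (x : Int) (p : Nat)
    (hp : p ≤ vals.length) :
    ∀ k : Nat, p ≤ k * b →
    (∀ i, ∀ hi : i < vals.length, p ≤ i → i < k * b → vals[i]'hi < x) →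
    skipR vals x p = (blockScan vals (bmaxOf vals b) b x k).getD vals.length := by
  have hlen : (bmaxOf vals b).length = (vals.length + b - 1) / b := by simp [bmaxOf]
  intro k
  induction hn : (bmaxOf vals b).length - k using Nat.strong_induction_on generalizing k with
  | _ n ih =>
  intro hpk hcov
  by_cases hk : k < (bmaxOf vals b).length
  · rw [blockScan, dif_pos hk]
    by_cases hbm : x ≤ (bmaxOf vals b).getD k 0
    · rw [if_pos hbm]
      cases hscan : scanFrom vals x (k * b) (min ((k + 1) * b) vals.length) with
      | some j =>
        simp only [Option.getD_some]
        obtain ⟨a1, a2, a3, a4⟩ := scanFrom_some vals x (k * b) _ j hscan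
        have hj : j < vals.length := by omega
        apply skipR_eq vals x p j (by omega) (by omega)
        · intro i hi hpi hij
          rcases Nat.lt_or_ge i (k * b) with h | h
          · exact hcov i hi hpi h
          · have := a4 i h hij
            rwa [List.getD_eq_getElem _ _ hi] at this
        · intro hq
          rw [List.getD_eq_getElem _ _ hj] at a3
          exact a3
      | none =>
        have hmono : k * b ≤ (k + 1) * b := Nat.mul_le_mul_right b (Nat.le_succ k)
        apply ih ((bmaxOf vals b).length - (k + 1)) (by omega) (k + 1) rfl (by omega)
        intro i hi hpi hik
        rcases Nat.lt_or_ge i (k * b) with h | h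
        · exact hcov i hi hpi h
        · have := scanFrom_none vals x (k * b) _ hscan i h (by omega)
          rwa [List.getD_eq_getElem _ _ hi] at this
    · rw [if_neg hbm]
      rw [not_le] at hbm
      have hmono : k * b ≤ (k + 1) * b := Nat.mul_le_mul_right b (Nat.le_succ k)
      apply ih ((bmaxOf vals b).length - (k + 1)) (by omega) (k + 1) rfl (by omega)
      intro i hi hpi hik
      rcases Nat.lt_or_ge i (k * b) with h | h
      · exact hcov i hi hpi h
      · have := block_le_bmax vals b k i (by omega) hi h (by omega)
        omega
  · rw [blockScan, dif_neg hk]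
    simp only [Option.getD_none]
    have hcover : vals.length ≤ k * b := by
      have h1 : vals.length ≤ ((vals.length + b - 1) / b) * b := blocks_cover vals.length b hb
      have h2 : ((vals.length + b - 1) / b) * b ≤ k * b :=
        Nat.mul_le_mul_right b (by omega)
      omega
    apply skipR_eq vals x p vals.length hp (le_refl _)
    · intro j hj hpj hjq
      exact hcov j hj hpj (by omega)
    · intro hq
      omega

-- firstGe computes the linear skip.
theorem firstGe_eq_skipR (vals : List Int) (b : Nat) (hb : 0 < b) (x : Int) (p : Nat)
    (hp : p ≤ vals.length) :
    firstGe vals (bmaxOf vals b) b p x = skipR vals x p := by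
  rw [firstGe]
  cases hscan : scanFrom vals x p (min ((p / b + 1) * b) vals.length) with
  | some j =>
    obtain ⟨a1, a2, a3, a4⟩ := scanFrom_some vals x p _ j hscan
    have hj : j < vals.length := by omega
    refine (skipR_eq vals x p j a1 (by omega) ?_ ?_).symm
    · intro i hi hpi hij
      have := a4 i hpi hij
      rwa [List.getD_eq_getElem _ _ hi] at this
    · intro hq
      rw [List.getD_eq_getElem _ _ hj] at a3
      exact a3
  | none =>
    have hstart : p ≤ (p / b + 1) * b := le_of_lt (lt_succ_div_mul p b hb)
    have hcov2 : ∀ i, ∀ hi : i < vals.length, p ≤ i → i < (p / b + 1) * b → vals[i]'hi < x := by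
      intro i hi hpi hik
      have := scanFrom_none vals x p _ hscan i hpi (by omega)
      rwa [List.getD_eq_getElem _ _ hi] at this
    have hmain := blockScan_eq_skipR vals b hb x p hp (p / b + 1) hstart hcov2
    cases hbs : blockScan vals (bmaxOf vals b) b x (p / b + 1) with
    | some j => rw [hbs] at hmain; simpa using hmain.symm
    | none => rw [hbs] at hmain; simpa using hmain.symm

-- B's outer loop equals the reference loop.
theorem altGo_eq_altLoop (vals : List Int) (b : Nat) (hb : 0 < b) :
    ∀ (xs : List Int) (r : Nat), r ≤ vals.length →
      altGo vals (bmaxOf vals b) b xs r = altLoop vals r xs := by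
  intro xs
  induction xs with
  | nil => intro r _; rfl
  | cons x rest ih =>
    intro r hr
    simp only [altGo, altLoop]
    rw [firstGe_eq_skipR vals b hb x r hr]
    have hle : skipR vals x r ≤ vals.length := skipR_le vals x r hr
    by_cases hlt : skipR vals x r < vals.length
    · have hne : ¬ skipR vals x r = vals.length := by omega
      rw [if_neg hne, dif_pos hlt, List.getD_eq_getElem _ _ hlt]
      by_cases he : vals[skipR vals x r]'hlt = x + 1
      · rw [if_pos he, if_pos he]
      · rw [if_neg he, if_neg he]
        exact ih (skipR vals x r) hle
    · have heq : skipR vals x r = vals.length := by omega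
      rw [if_pos heq, dif_neg hlt]

theorem calcB_le (m : Nat) : ∀ b : Nat, b ≤ calcB m b := by
  intro b
  induction hn : m - b * b using Nat.strong_induction_on generalizing b with
  | _ n ih =>
  rw [calcB]
  by_cases h : b * b < m
  · rw [dif_pos h]
    have h1 : b * b + 1 ≤ (b + 1) * (b + 1) := by nlinarith
    have := ih (m - (b + 1) * (b + 1)) (by omega) (b + 1) rfl
    omega
  · rw [dif_neg h]

-- ===== VERDICT (by name: the statement is the Claim_ definition above) =====
theorem has_phrase_2_spec : Claim_equal_has_phrase_2 := by
  intro list_1 list_2 _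
  unfold Spec_has_phrase_2 has_phrase_2 has_phrase_2_alt
  have hb : 0 < calcB list_2.length 1 := calcB_le list_2.length 1
  rw [altGo_eq_altLoop list_2 (calcB list_2.length 1) hb list_1 0 (Nat.zero_le _)]
  simpa using go_eq_altLoop list_1 list_2 0 0
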